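-- pv_equiv track=rewrite | github.com/AYEOOON/Algorithm | 프로그래머스/Python/2단계/[2018 KAKAO BLIND RECRUITMENT] - [3차] 파일명 정렬.py | solution
-- ===== SOURCE A (Python) =====
-- def solution(files):
--     arr = []
--
--     for file in files:
--         HEAD, NUM, TAIL = '', '', ''
--         for i in range(len(file)):
--             if file[i].isdigit():
--                 HEAD = file[:i]
--                 NUM = file[i:]
--
--                 for j in range(len(NUM)):
--                     if NUM[j].isdigit() == False:
--                         TAIL = NUM[j:]
--                         NUM = NUM[:j]
--                         break
--
--                 arr.append([HEAD, NUM, TAIL])  # 들여쓰기 부분 중요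
--                 break  # 중요
--
--
--     arr = sorted(arr, key = lambda x : (x[0].lower(), int(x[1])))
--
--     return [''.join(i) for i in arr]
-- ===== SOURCE B (Python) =====
-- def solution(files):
--     arr = []
--     for file in files:
--         # single left-to-right pass: 3-state machine (head / number / tail)
--         state = 0
--         head, num, tail = [], [], []
--         for ch in file:
--             if state == 0:
--                 if ch.isdigit():
--                     state = 1
--                     num.append(ch)
--                 else:
--                     head.append(ch)
--             elif state == 1:
--                 if ch.isdigit():
--                     num.append(ch)
--                 else:
--                     state = 2
--                     tail.append(ch)
--             else:
--                 tail.append(ch)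
--         if state != 0:
--             arr.append((''.join(head), ''.join(num), ''.join(tail)))
--     arr = sorted(arr, key=lambda x: (x[0].lower(), int(x[1])))
--     return [''.join(i) for i in arr]
-- ===== Notes on version B (the rewrite author's own statement) =====
-- stated objective: alternative
-- what changed: Replaces A's nested index scans with slicing (find first digit index, re-scan the suffix for the first non-digit, cut with slices) by a single left-to-right 3-state machine (head/number/tail) over each filename; the stable sort and join stay the same.
import Mathlib
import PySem

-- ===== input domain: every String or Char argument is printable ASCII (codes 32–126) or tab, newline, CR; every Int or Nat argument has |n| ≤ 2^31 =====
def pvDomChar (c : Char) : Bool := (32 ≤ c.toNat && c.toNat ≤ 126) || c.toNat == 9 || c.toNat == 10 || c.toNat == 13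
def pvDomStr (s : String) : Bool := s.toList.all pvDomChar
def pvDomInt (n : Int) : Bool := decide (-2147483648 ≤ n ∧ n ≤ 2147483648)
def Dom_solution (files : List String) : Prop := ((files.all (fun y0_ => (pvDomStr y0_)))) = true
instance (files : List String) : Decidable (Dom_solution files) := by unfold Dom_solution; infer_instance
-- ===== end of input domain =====

set_option maxRecDepth 10000


-- B replaces A's nested index-scan-and-slice parse by a single-pass 3-state machine; same stable sort and join (objective: alternative).

-- ===== PORT A =====
-- inner loop: 'for j in range(len(NUM)): if NUM[j].isdigit() == False: TAIL = NUM[j:]; NUM = NUM[:j]; break'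
-- returns the final (NUM, TAIL)
def aInner (num : List Char) (j : Nat) : List Char × List Char :=
  if h : j < num.length then
    if PySem.Chars.isdigit num[j] = false then
      (PySem.List.slice num none (some (j : Int)), PySem.List.slice num (some (j : Int)) none)
    else aInner num (j + 1)
  else (num, [])
termination_by num.length - j

-- outer loop: 'for i in range(len(file)): if file[i].isdigit(): HEAD = file[:i]; NUM = file[i:]; …; arr.append(...); break'
-- (the loop appends at most one triple, then breaks: modelled as an Option)
def aOuter (file : List Char) (i : Nat) : Option (List Char × List Char × List Char) :=
  if h : i < file.length then
    if PySem.Chars.isdigit file[i] then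
      some (PySem.List.slice file none (some (i : Int)),
            (aInner (PySem.List.slice file (some (i : Int)) none) 0).1,
            (aInner (PySem.List.slice file (some (i : Int)) none) 0).2)
    else aOuter file (i + 1)
  else none
termination_by file.length - i

def solution (files : List String) : List String :=
  let arr := files.foldl (fun arr file =>
    match aOuter file.toList 0 with
    | some (h, n, t) => arr ++ [(String.ofList h, String.ofList n, String.ofList t)]
    | none => arr) []
  -- sorted(arr, key=lambda x: (x[0].lower(), int(x[1]))); NUM is a nonempty digit run here, so int() never raises
  let arr := PySem.List.sorted2 arr (fun x => PySem.Str.lower x.1) (fun x => (PySem.Int.ofStr? x.2.1).getD 0)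
  arr.map (fun x => PySem.Str.join "" [x.1, x.2.1, x.2.2])

-- ===== PORT B =====
-- one step of the state machine: state 0 = head, 1 = number, 2 = tail
def bStep (s : Nat × List Char × List Char × List Char) (ch : Char) :
    Nat × List Char × List Char × List Char :=
  if s.1 == 0 then
    if PySem.Chars.isdigit ch then (1, s.2.1, s.2.2.1 ++ [ch], s.2.2.2)
    else (0, s.2.1 ++ [ch], s.2.2.1, s.2.2.2)
  else if s.1 == 1 then
    if PySem.Chars.isdigit ch then (1, s.2.1, s.2.2.1 ++ [ch], s.2.2.2)
    else (2, s.2.1, s.2.2.1, s.2.2.2 ++ [ch])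
  else (s.1, s.2.1, s.2.2.1, s.2.2.2 ++ [ch])

def solution_alt (files : List String) : List String :=
  let arr := files.foldl (fun arr file =>
    let st := file.toList.foldl bStep (0, [], [], [])
    if st.1 ≠ 0 then arr ++ [(String.ofList st.2.1, String.ofList st.2.2.1, String.ofList st.2.2.2)]
    else arr) []
  let arr := PySem.List.sorted2 arr (fun x => PySem.Str.lower x.1) (fun x => (PySem.Int.ofStr? x.2.1).getD 0)
  arr.map (fun x => PySem.Str.join "" [x.1, x.2.1, x.2.2])

-- ===== PRECONDITION & SPEC =====
def Spec_solution (files : List String) (out : List String) : Prop := out = solution_alt files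
instance (files : List String) (out : List String) : Decidable (Spec_solution files out) := by unfold Spec_solution; infer_instance

-- ===== CLAIM (what is proved, stated in full; the proofs are below) =====
def Claim_equal_solution : Prop := ∀ (files : List String), Dom_solution files → Spec_solution files (solution files)

-- ===== LEMMAS AND PROOFS =====

lemma aInner_spec (num : List Char) (j : Nat) :
    aInner num j = (num.take j ++ (num.drop j).takeWhile PySem.Chars.isdigit,
                    (num.drop j).dropWhile PySem.Chars.isdigit) := by
  fun_induction aInner num j with
  | case1 j h hd =>
    have hdrop : num.drop j = num[j] :: num.drop (j + 1) := List.drop_eq_getElem_cons h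
    have h1 : (num.drop j).takeWhile PySem.Chars.isdigit = [] := by
      rw [hdrop, List.takeWhile_cons, hd]; rfl
    have h2 : (num.drop j).dropWhile PySem.Chars.isdigit = num.drop j := by
      rw [hdrop, List.dropWhile_cons, hd]; rfl
    rw [PySem.List.slice_to_natCast, PySem.List.slice_from_natCast, h1, h2, List.append_nil]
  | case2 j h hd ih =>
    have hdrop : num.drop j = num[j] :: num.drop (j + 1) := List.drop_eq_getElem_cons h
    have hdig : PySem.Chars.isdigit num[j] = true := by
      cases hx : PySem.Chars.isdigit num[j] with
      | false => exact absurd hx hd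
      | true => rfl
    have htake : num.take (j + 1) = num.take j ++ [num[j]] := by
      rw [List.take_add_one, List.getElem?_eq_getElem h]; rfl
    have h1 : (num.drop j).takeWhile PySem.Chars.isdigit
        = num[j] :: (num.drop (j + 1)).takeWhile PySem.Chars.isdigit := by
      rw [hdrop, List.takeWhile_cons, hdig]; rfl
    have h2 : (num.drop j).dropWhile PySem.Chars.isdigit
        = (num.drop (j + 1)).dropWhile PySem.Chars.isdigit := by
      rw [hdrop, List.dropWhile_cons, hdig]; rfl
    rw [ih, h1, h2, htake, List.append_assoc, List.singleton_append]
  | case3 j h =>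
    have hle : num.length ≤ j := Nat.le_of_not_lt h
    rw [List.drop_eq_nil_of_le hle, List.take_of_length_le hle]
    simp

lemma aOuter_spec (file : List Char) (i : Nat) :
    aOuter file i =
      (if (file.drop i).dropWhile (fun c => !PySem.Chars.isdigit c) = [] then none
       else some (file.take i ++ (file.drop i).takeWhile (fun c => !PySem.Chars.isdigit c),
                  ((file.drop i).dropWhile (fun c => !PySem.Chars.isdigit c)).takeWhile PySem.Chars.isdigit,
                  ((file.drop i).dropWhile (fun c => !PySem.Chars.isdigit c)).dropWhile PySem.Chars.isdigit)) := by
  fun_induction aOuter file i with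
  | case1 i h hd =>
    have hdrop : file.drop i = file[i] :: file.drop (i + 1) := List.drop_eq_getElem_cons h
    have h1 : (file.drop i).dropWhile (fun c => !PySem.Chars.isdigit c) = file.drop i := by
      rw [hdrop, List.dropWhile_cons, hd]; rfl
    have h2 : (file.drop i).takeWhile (fun c => !PySem.Chars.isdigit c) = [] := by
      rw [hdrop, List.takeWhile_cons, hd]; rfl
    have hne2 : file.drop i ≠ [] := by rw [hdrop]; exact List.cons_ne_nil _ _
    rw [PySem.List.slice_to_natCast, PySem.List.slice_from_natCast, aInner_spec, h1, h2,
      if_neg hne2]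
    simp only [List.take_zero, List.drop_zero, List.nil_append, List.append_nil]
  | case2 i h hd ih =>
    have hdrop : file.drop i = file[i] :: file.drop (i + 1) := List.drop_eq_getElem_cons h
    have hnd : PySem.Chars.isdigit file[i] = false := by
      cases hx : PySem.Chars.isdigit file[i] with
      | false => rfl
      | true => exact absurd hx hd
    have htake : file.take (i + 1) = file.take i ++ [file[i]] := by
      rw [List.take_add_one, List.getElem?_eq_getElem h]; rfl
    have h1 : (file.drop i).dropWhile (fun c => !PySem.Chars.isdigit c)
        = (file.drop (i + 1)).dropWhile (fun c => !PySem.Chars.isdigit c) := by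
      rw [hdrop, List.dropWhile_cons, hnd]; rfl
    have h2 : (file.drop i).takeWhile (fun c => !PySem.Chars.isdigit c)
        = file[i] :: (file.drop (i + 1)).takeWhile (fun c => !PySem.Chars.isdigit c) := by
      rw [hdrop, List.takeWhile_cons, hnd]; rfl
    rw [ih, h1, h2, htake, List.append_assoc, List.singleton_append]
  | case3 i h =>
    have hle : file.length ≤ i := Nat.le_of_not_lt h
    rw [List.drop_eq_nil_of_le hle]
    simp

lemma fold2_spec (cs : List Char) (h n t : List Char) :
    cs.foldl bStep (2, h, n, t) = (2, h, n, t ++ cs) := by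
  induction cs generalizing t with
  | nil => simp
  | cons c cs ih => simp [bStep, List.foldl_cons, ih]

lemma fold1_spec (cs : List Char) (h n t : List Char) :
    cs.foldl bStep (1, h, n, t) =
      (if cs.dropWhile PySem.Chars.isdigit = [] then (1, h, n ++ cs, t)
       else (2, h, n ++ cs.takeWhile PySem.Chars.isdigit, t ++ cs.dropWhile PySem.Chars.isdigit)) := by
  induction cs generalizing n with
  | nil => simp
  | cons c cs ih =>
    by_cases hc : PySem.Chars.isdigit c = true
    · simp [bStep, List.foldl_cons, hc, ih]
    · have hc' : PySem.Chars.isdigit c = false := by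
        cases hx : PySem.Chars.isdigit c with
        | false => rfl
        | true => exact absurd hx hc
      simp [bStep, List.foldl_cons, hc', fold2_spec]

lemma fold0_spec (cs : List Char) (h : List Char) :
    cs.foldl bStep (0, h, [], []) =
      (if cs.dropWhile (fun c => !PySem.Chars.isdigit c) = [] then (0, h ++ cs, [], [])
       else ((if ((cs.dropWhile (fun c => !PySem.Chars.isdigit c)).dropWhile PySem.Chars.isdigit) = [] then 1 else 2),
             h ++ cs.takeWhile (fun c => !PySem.Chars.isdigit c),
             (cs.dropWhile (fun c => !PySem.Chars.isdigit c)).takeWhile PySem.Chars.isdigit,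
             (cs.dropWhile (fun c => !PySem.Chars.isdigit c)).dropWhile PySem.Chars.isdigit)) := by
  induction cs generalizing h with
  | nil => simp
  | cons c cs ih =>
    rw [List.foldl_cons]
    by_cases hc : PySem.Chars.isdigit c = true
    · have hstep : bStep (0, h, [], []) c = (1, h, [c], []) := by simp [bStep, hc]
      have g1 : (c :: cs).dropWhile (fun c => !PySem.Chars.isdigit c) = c :: cs := by
        rw [List.dropWhile_cons, hc]; rfl
      have g2 : (c :: cs).takeWhile (fun c => !PySem.Chars.isdigit c) = [] := by
        rw [List.takeWhile_cons, hc]; rfl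
      have g3 : (c :: cs).dropWhile PySem.Chars.isdigit = cs.dropWhile PySem.Chars.isdigit := by
        rw [List.dropWhile_cons, hc]; rfl
      have g4 : (c :: cs).takeWhile PySem.Chars.isdigit
          = c :: cs.takeWhile PySem.Chars.isdigit := by
        rw [List.takeWhile_cons, hc]; rfl
      rw [hstep, fold1_spec, g1, g2, g3, g4, if_neg (List.cons_ne_nil c cs)]
      split_ifs with h1
      · have hself : cs.takeWhile PySem.Chars.isdigit = cs :=
          List.takeWhile_eq_self_iff.mpr (List.dropWhile_eq_nil_iff.mp h1)
        rw [hself, h1]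
        simp
      · simp
    · have hc' : PySem.Chars.isdigit c = false := by
        cases hx : PySem.Chars.isdigit c with
        | false => rfl
        | true => exact absurd hx hc
      have hstep : bStep (0, h, [], []) c = (0, h ++ [c], [], []) := by simp [bStep, hc']
      have g1 : (c :: cs).dropWhile (fun c => !PySem.Chars.isdigit c)
          = cs.dropWhile (fun c => !PySem.Chars.isdigit c) := by
        rw [List.dropWhile_cons, hc']; rfl
      have g2 : (c :: cs).takeWhile (fun c => !PySem.Chars.isdigit c)
          = c :: cs.takeWhile (fun c => !PySem.Chars.isdigit c) := by
        rw [List.takeWhile_cons, hc']; rfl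
      rw [hstep, ih, g1, g2]
      split_ifs with h1 <;> simp [List.append_assoc]

-- the two per-file loop bodies agree
lemma body_eq (arr : List (String × String × String)) (file : String) :
    (match aOuter file.toList 0 with
     | some (h, n, t) => arr ++ [(String.ofList h, String.ofList n, String.ofList t)]
     | none => arr) =
    (let st := file.toList.foldl bStep (0, [], [], [])
     if st.1 ≠ 0 then arr ++ [(String.ofList st.2.1, String.ofList st.2.2.1, String.ofList st.2.2.2)]
     else arr) := by
  rw [aOuter_spec, fold0_spec]
  simp only [List.drop_zero, List.take_zero, List.nil_append]
  by_cases hE : (file.toList.dropWhile (fun c => !PySem.Chars.isdigit c)) = []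
  · simp [hE]
  · rw [if_neg hE, if_neg hE]
    by_cases h2 : ((file.toList.dropWhile (fun c => !PySem.Chars.isdigit c)).dropWhile PySem.Chars.isdigit) = []
    · simp [h2]
    · simp [h2]

theorem solution_eq_alt (files : List String) : solution files = solution_alt files := by
  unfold solution solution_alt
  have harr : files.foldl (fun arr file =>
      match aOuter file.toList 0 with
      | some (h, n, t) => arr ++ [(String.ofList h, String.ofList n, String.ofList t)]
      | none => arr) [] =
    files.foldl (fun arr file =>
      let st := file.toList.foldl bStep (0, [], [], [])
      if st.1 ≠ 0 then arr ++ [(String.ofList st.2.1, String.ofList st.2.2.1, String.ofList st.2.2.2)]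
      else arr) [] := by
    apply PySem.List.foldl_congr_mem
    intro acc x _
    exact body_eq acc x
  rw [harr]

-- ===== VERDICT (by name: the statement is the Claim_ definition above) =====
theorem solution_spec : Claim_equal_solution := by
  intro files _
  unfold Spec_solution
  exact solution_eq_alt files
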